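-- pv_equiv track=rewrite | github.com/vigneshsabapathi/python-algorithms | bit_manipulation/binary_or_operator_optimized.py | binary_or_bitwise_char
-- ===== SOURCE A (Python) =====
-- def binary_or_bitwise_char(a: int, b: int) -> str:
--     """
--     Binary OR using ord()-based char manipulation — no int() parse per step.
--
--     '0' = ord 48, '1' = ord 49.  OR of two ASCII digit chars:
--     '0'|'0'=48, '0'|'1'=49, '1'|'0'=49, '1'|'1'=49.
--     (ord('0') | ord('1')) == ord('1') — OR maps naturally onto ASCII digits.
--
--     >>> binary_or_bitwise_char(25, 32)
--     '0b111001'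
--     >>> binary_or_bitwise_char(37, 50)
--     '0b110111'
--     >>> binary_or_bitwise_char(21, 30)
--     '0b11111'
--     >>> binary_or_bitwise_char(58, 73)
--     '0b1111011'
--     >>> binary_or_bitwise_char(0, 255)
--     '0b11111111'
--     >>> binary_or_bitwise_char(0, 256)
--     '0b100000000'
--     >>> binary_or_bitwise_char(0, -1)
--     Traceback (most recent call last):
--         ...
--     ValueError: the value of both inputs must be positive
--     """
--     if a < 0 or b < 0:
--         raise ValueError("the value of both inputs must be positive")
--     a_bin = format(a, "b")
--     b_bin = format(b, "b")
--     max_len = max(len(a_bin), len(b_bin))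
--     return "0b" + "".join(
--         chr(ord(ca) | ord(cb))
--         for ca, cb in zip(a_bin.zfill(max_len), b_bin.zfill(max_len))
--     )
-- ===== SOURCE B (Python) =====
-- def binary_or_bitwise_char(a: int, b: int) -> str:
--     if a < 0 or b < 0:
--         raise ValueError("the value of both inputs must be positive")
--     digits = []
--     while a > 0 or b > 0:
--         digits.append('1' if (a % 2) + (b % 2) > 0 else '0')
--         a //= 2
--         b //= 2
--     return "0b" + (''.join(reversed(digits)) or "0")
-- ===== Notes on version B (the rewrite author's own statement) =====
-- stated objective: alternative
-- what changed: B never formats or pads binary strings: it loops over the two integers directly, emitting one digit per step from (a%2)+(b%2) while halving both, and builds the result LSB-first then reversed, whereas A formats both numbers, zfills them to a common length, and ORs the ASCII chars pairwise.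
import Mathlib
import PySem

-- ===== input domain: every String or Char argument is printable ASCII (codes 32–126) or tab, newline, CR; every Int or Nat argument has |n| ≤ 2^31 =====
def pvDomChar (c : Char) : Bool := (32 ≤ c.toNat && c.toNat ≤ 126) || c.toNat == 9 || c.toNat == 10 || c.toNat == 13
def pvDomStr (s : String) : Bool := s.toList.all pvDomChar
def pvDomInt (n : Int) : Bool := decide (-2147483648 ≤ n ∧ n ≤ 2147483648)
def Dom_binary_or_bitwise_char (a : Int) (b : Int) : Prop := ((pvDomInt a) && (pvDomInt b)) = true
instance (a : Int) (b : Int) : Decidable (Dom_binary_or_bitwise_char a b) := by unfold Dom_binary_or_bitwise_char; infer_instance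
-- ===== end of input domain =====

-- B replaces A's format/zfill/zip/per-char-OR pipeline by a single arithmetic loop over the
-- two integers (emit a digit from (a%2)+(b%2), halve both, reverse at the end); equivalence is
-- proved on the non-raising inputs (a, b ≥ 0).

-- ===== PORT A =====

-- format(n, "b") digits for n > 0, [] for n = 0 (exact: binary digits, MSB first, no leading zeros)
def binDigits : Nat → List Char
  | 0 => []
  | n + 1 => binDigits ((n + 1) / 2) ++ [if (n + 1) % 2 = 1 then '1' else '0']
decreasing_by exact Nat.div_lt_self (Nat.succ_pos n) (by omega)

-- format(n, "b") for n ≥ 0 (exact: "0" for 0, else the digits)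
def formatB (n : Nat) : List Char := if n = 0 then ['0'] else binDigits n

-- s.zfill(k) on a sign-free digit string (exact there: left-pad with '0' to length k)
def zfillChars (cs : List Char) (k : Nat) : List Char := List.replicate (k - cs.length) '0' ++ cs

def binary_or_bitwise_char (a : Int) (b : Int) : String :=
  -- the guard `if a < 0 or b < 0: raise ValueError(...)` is Pre_'s to exclude
  let aBin := formatB a.toNat
  let bBin := formatB b.toNat
  let maxLen := max aBin.length bBin.length
  String.ofList ('0' :: 'b' ::
    ((zfillChars aBin maxLen).zip (zfillChars bBin maxLen)).map
      (fun p => Char.ofNat (p.1.toNat ||| p.2.toNat)))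

-- ===== PORT B =====

-- the while loop of Source B: the `digits` list in append (LSB-first) order
def orLoop (m : Nat) (n : Nat) : List Char :=
  if m = 0 ∧ n = 0 then []
  else (if 0 < m % 2 + n % 2 then '1' else '0') :: orLoop (m / 2) (n / 2)
termination_by m + n
decreasing_by
  rename_i h
  have hm2 := Nat.div_le_self m 2
  have hn2 := Nat.div_le_self n 2
  rcases Decidable.not_and_iff_or_not.mp h with h' | h'
  · have hlt : m / 2 < m := Nat.div_lt_self (Nat.pos_of_ne_zero h') (by omega)
    omega
  · have hlt : n / 2 < n := Nat.div_lt_self (Nat.pos_of_ne_zero h') (by omega)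
    omega

def binary_or_bitwise_char_alt (a : Int) (b : Int) : String :=
  -- the guard `if a < 0 or b < 0: raise ValueError(...)` is Pre_'s to exclude
  let digits := orLoop a.toNat b.toNat
  let s := digits.reverse                           -- ''.join(reversed(digits))
  String.ofList ('0' :: 'b' :: (if s = [] then ['0'] else s))  -- `or "0"`

-- ===== PRECONDITION & SPEC =====
-- Pre_ excludes exactly the inputs on which A (and B alike) raises ValueError: a negative argument.
def Pre_binary_or_bitwise_char (a : Int) (b : Int) : Prop := 0 ≤ a ∧ 0 ≤ b
instance (a : Int) (b : Int) : Decidable (Pre_binary_or_bitwise_char a b) := by unfold Pre_binary_or_bitwise_char; infer_instance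
def pvWitness_binary_or_bitwise_char : Int × Int := (25, 32)

def Spec_binary_or_bitwise_char (a : Int) (b : Int) (out : String) : Prop := out = binary_or_bitwise_char_alt a b
instance (a : Int) (b : Int) (out : String) : Decidable (Spec_binary_or_bitwise_char a b out) := by unfold Spec_binary_or_bitwise_char; infer_instance

-- ===== CLAIM (what is proved, stated in full; the proofs are below) =====
def Claim_equal_binary_or_bitwise_char : Prop := ∀ (a : Int) (b : Int), Dom_binary_or_bitwise_char a b → Pre_binary_or_bitwise_char a b → Spec_binary_or_bitwise_char a b (binary_or_bitwise_char a b)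

-- ===== LEMMAS AND PROOFS =====

-- the k binary digits of n, MSB first (with leading zeros)
def bits (k n : Nat) : List Char :=
  (List.range k).reverse.map (fun i => if n.testBit i then '1' else '0')

theorem bits_succ (k n : Nat) :
    bits (k + 1) n = (if n.testBit k then '1' else '0') :: bits k n := by
  simp [bits, List.range_succ]

theorem bits_div (k n : Nat) :
    bits (k + 1) n = bits k (n / 2) ++ [if n % 2 = 1 then '1' else '0'] := by
  simp only [bits, List.range_succ_eq_map, List.reverse_cons, List.map_append,
    List.map_cons, List.map_nil]
  congr 1
  · rw [← List.map_reverse, List.map_map]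
    apply List.map_congr_left
    intro i _
    simp [Function.comp, Nat.testBit_add_one]
  · simp [Nat.testBit_zero]

theorem length_binDigits_pos (n : Nat) (h : n ≠ 0) : (binDigits n).length ≠ 0 := by
  cases n with
  | zero => exact absurd rfl h
  | succ m => simp [binDigits]

-- (binDigits n).length ≤ k ↔ n < 2^k : the digit count is the bit length
theorem length_binDigits_le_iff (k : Nat) : ∀ n, (binDigits n).length ≤ k ↔ n < 2 ^ k := by
  induction k with
  | zero =>
    intro n
    cases n with
    | zero => simp [binDigits]
    | succ m => simp [binDigits]
  | succ k ih =>
    intro n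
    cases n with
    | zero => simpa [binDigits] using Nat.pos_pow_of_pos (k+1) (by omega)
    | succ m =>
      have h2 : (m + 1) / 2 < 2 ^ k ↔ m + 1 < 2 ^ (k + 1) := by
        rw [Nat.div_lt_iff_lt_mul (by omega), pow_succ]
      simpa [binDigits, Nat.succ_le_succ_iff, ih ((m + 1) / 2)] using h2

theorem binDigits_eq_bits : ∀ n, binDigits n = bits (binDigits n).length n := by
  intro n
  induction n using Nat.strong_induction_on with
  | _ n ih =>
    cases n with
    | zero => simp [binDigits, bits]
    | succ m =>
      have hlt : (m + 1) / 2 < m + 1 := Nat.div_lt_self (Nat.succ_pos m) (by omega)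
      have := ih ((m + 1) / 2) hlt
      rw [binDigits]
      rw [List.length_append, List.length_singleton, bits_div]
      rw [← this]

theorem bits_pad (j n : Nat) (h : n < 2 ^ j) :
    ∀ k, bits (j + k) n = List.replicate k '0' ++ bits j n := by
  intro k
  induction k with
  | zero => simp
  | succ k ih =>
    have hb : n.testBit (j + k) = false :=
      Nat.testBit_lt_two_pow (lt_of_lt_of_le h (Nat.pow_le_pow_right (by omega) (by omega)))
    rw [show j + (k + 1) = (j + k) + 1 by omega, bits_succ, hb, ih]
    simp [List.replicate_succ]

-- zfill of format(n,"b") to any length k ≥ its own length (and k ≥ 1) is the k-bit string of n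
theorem zfill_formatB (n k : Nat) (hk : 1 ≤ k) (hlen : (formatB n).length ≤ k) :
    zfillChars (formatB n) k = bits k n := by
  by_cases h0 : n = 0
  · subst h0
    have hb : bits k 0 = List.replicate k '0' := by
      simp [bits]
    rw [hb]
    simp only [formatB, zfillChars]
    rw [show k = (k - 1) + 1 by omega]
    simp [List.replicate_succ']
  · simp only [formatB, if_neg h0, zfillChars] at *
    set L := (binDigits n).length with hL
    have hnlt : n < 2 ^ L := (length_binDigits_le_iff L n).mp le_rfl
    have := bits_pad L n hnlt (k - L)
    rw [show L + (k - L) = k by omega] at this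
    rw [this, ← binDigits_eq_bits]

-- char-level OR of two binary digit chars is the digit of the boolean OR
theorem charOr_digit (p q : Bool) :
    Char.ofNat ((if p then '1' else '0').toNat ||| (if q then '1' else '0').toNat)
      = (if (p || q) then '1' else '0') := by
  cases p <;> cases q <;> decide

-- the zipped per-char OR of the two k-bit strings is the k-bit string of the OR
theorem bits_or (k m n : Nat) :
    (((bits k m).zip (bits k n)).map (fun p => Char.ofNat (p.1.toNat ||| p.2.toNat)))
      = bits k (m ||| n) := by
  simp only [bits, List.zip_map', List.map_map]
  apply List.map_congr_left
  intro i _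
  simp only [Function.comp, Nat.testBit_or]
  exact charOr_digit (m.testBit i) (n.testBit i)

theorem length_formatB_pos (n : Nat) : 1 ≤ (formatB n).length := by
  by_cases h : n = 0
  · simp [formatB, h]
  · simp only [formatB, if_neg h]
    exact Nat.one_le_iff_ne_zero.mpr (length_binDigits_pos n h)

-- the whole digit-string computation of A is format(m|n,"b")
theorem main_digits (m n : Nat) :
    ((zfillChars (formatB m) (max (formatB m).length (formatB n).length)).zip
      (zfillChars (formatB n) (max (formatB m).length (formatB n).length))).map
        (fun p => Char.ofNat (p.1.toNat ||| p.2.toNat))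
      = formatB (m ||| n) := by
  set L := max (formatB m).length (formatB n).length with hL
  have hk : 1 ≤ L := le_trans (length_formatB_pos m) (le_max_left _ _)
  rw [zfill_formatB m L hk (le_max_left _ _), zfill_formatB n L hk (le_max_right _ _), bits_or]
  have hlen : (formatB (m ||| n)).length = L := by
    by_cases hm : m = 0
    · subst hm
      have h0 : (formatB 0).length = 1 := rfl
      have h1 := length_formatB_pos n
      rw [Nat.zero_or]
      simp only [hL, h0]
      omega
    · by_cases hn : n = 0
      · subst hn
        have h0 : (formatB 0).length = 1 := rfl
        have h1 := length_formatB_pos m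
        rw [Nat.or_zero]
        simp only [hL, h0]
        omega
      · have hor : m ||| n ≠ 0 := by
          intro h
          have h1 : m ≤ m ||| n := Nat.left_le_or
          omega
        simp only [hL, formatB, if_neg hm, if_neg hn, if_neg hor]
        apply le_antisymm
        · rw [length_binDigits_le_iff]
          exact Nat.or_lt_two_pow
            ((length_binDigits_le_iff _ m).mp (le_max_left _ _))
            ((length_binDigits_le_iff _ n).mp (le_max_right _ _))
        · apply max_le <;>
          · rw [length_binDigits_le_iff]
            refine lt_of_le_of_lt ?_ ((length_binDigits_le_iff _ (m ||| n)).mp le_rfl)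
            first
              | exact Nat.left_le_or
              | exact Nat.right_le_or
  have := zfill_formatB (m ||| n) L hk (le_of_eq hlen)
  rw [← this, zfillChars, hlen, Nat.sub_self, List.replicate_zero, List.nil_append]

-- ---- B-side characterisation ----

theorem lor_div_two (m n : Nat) : (m ||| n) / 2 = m / 2 ||| n / 2 := by
  apply Nat.eq_of_testBit_eq
  intro i
  simp [Nat.testBit_div_two]

theorem lor_digit (m n : Nat) :
    (if 0 < m % 2 + n % 2 then '1' else '0')
      = (if (m ||| n) % 2 = 1 then '1' else '0') := by
  have h := Nat.testBit_lor m n 0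
  simp only [Nat.testBit_zero] at h
  have hm : m % 2 < 2 := Nat.mod_lt m (by omega)
  have hn : n % 2 < 2 := Nat.mod_lt n (by omega)
  by_cases h1 : m % 2 = 1 <;> by_cases h2 : n % 2 = 1 <;>
    simp only [h1, h2, decide_true, decide_false, Bool.or_self, Bool.true_or, Bool.or_true,
      decide_eq_true_eq, decide_eq_false_iff_not] at h <;>
    first
      | (rw [if_pos (by omega), if_pos h])
      | (rw [if_neg (by omega), if_neg h])

-- binDigits unfolding for a nonzero argument
theorem binDigits_ne (k : Nat) (h : k ≠ 0) :
    binDigits k = binDigits (k / 2) ++ [if k % 2 = 1 then '1' else '0'] := by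
  cases k with
  | zero => exact absurd rfl h
  | succ j => rw [binDigits]

-- the reversed digits list of Source B's loop is exactly format(m|n,"b")'s digit list
theorem rev_orLoop (m n : Nat) : (orLoop m n).reverse = binDigits (m ||| n) := by
  induction m, n using orLoop.induct with
  | case1 m n h =>
    obtain ⟨hm, hn⟩ := h
    subst hm; subst hn
    rw [orLoop]
    simp [binDigits]
  | case2 m n h ih =>
    rw [orLoop, if_neg h]
    have hor : m ||| n ≠ 0 := by
      rcases Decidable.not_and_iff_or_not.mp h with h' | h'
      · intro hc
        have h1 : m ≤ m ||| n := Nat.left_le_or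
        omega
      · intro hc
        have h1 : n ≤ m ||| n := Nat.right_le_or
        omega
    rw [List.reverse_cons, ih, ← lor_div_two, lor_digit, ← binDigits_ne _ hor]

theorem orLoop_nil_iff (m n : Nat) : orLoop m n = [] ↔ (m = 0 ∧ n = 0) := by
  constructor
  · intro h
    by_contra hc
    rw [orLoop, if_neg hc] at h
    exact List.cons_ne_nil _ _ h
  · intro h
    rw [orLoop, if_pos h]

-- B's whole digit string equals formatB (m ||| n)
theorem alt_digits (m n : Nat) :
    (if (orLoop m n).reverse = [] then ['0'] else (orLoop m n).reverse)
      = formatB (m ||| n) := by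
  by_cases h : m = 0 ∧ n = 0
  · obtain ⟨hm, hn⟩ := h
    subst hm; subst hn
    rw [rev_orLoop]
    simp [binDigits, formatB]
  · have hne : orLoop m n ≠ [] := fun hc => h ((orLoop_nil_iff m n).mp hc)
    rw [if_neg (by simp [hne]), rev_orLoop]
    have hor : m ||| n ≠ 0 := by
      rcases Decidable.not_and_iff_or_not.mp h with h' | h'
      · intro hc
        have h1 : m ≤ m ||| n := Nat.left_le_or
        omega
      · intro hc
        have h1 : n ≤ m ||| n := Nat.right_le_or
        omega
    simp [formatB, hor]

-- ===== VERDICT (by name: the statement is the Claim_ definition above) =====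
theorem binary_or_bitwise_char_spec : Claim_equal_binary_or_bitwise_char := by
  intro a b _ hpre
  show String.ofList ('0' :: 'b' ::
      ((zfillChars (formatB a.toNat) (max (formatB a.toNat).length (formatB b.toNat).length)).zip
        (zfillChars (formatB b.toNat) (max (formatB a.toNat).length (formatB b.toNat).length))).map
          (fun p => Char.ofNat (p.1.toNat ||| p.2.toNat)))
    = String.ofList ('0' :: 'b' ::
        (if (orLoop a.toNat b.toNat).reverse = [] then ['0'] else (orLoop a.toNat b.toNat).reverse))
  rw [main_digits a.toNat b.toNat, ← alt_digits a.toNat b.toNat]
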